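-- pv_equiv track=rewrite | github.com/skyriv213/Note-Algorithm | 프로그래머스/2/49994. 방문 길이/방문 길이.py | solution
-- ===== SOURCE A (Python) =====
-- def solution(dirs):
--     dx = [1,0,-1,0]
--     dy = [0,1,0,-1]
--     di = ["R","U","L","D"]
--
--     answer = 0
--     pos = set()
--     px,py = 0,0
--     for i in dirs:
--         if i in di:
--             nx = px + dx[di.index(i)]
--             ny = py + dy[di.index(i)]
--             if -5 <= nx <= 5 and -5 <=ny<=5:
--                 if ((px,py),(nx,ny)) not in pos :
--                     answer +=1
--                     pos.add(((px,py),(nx,ny)))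
--                     pos.add(((nx,ny),(px,py)))
--                 px = nx
--                 py = ny
--
--     return answer
-- ===== SOURCE B (Python) =====
-- def solution(dirs):
--     moves = {'R': (1, 0), 'U': (0, 1), 'L': (-1, 0), 'D': (0, -1)}
--     # stage 1: the sequence of visited points
--     path = [(0, 0)]
--     for c in dirs:
--         if c in moves:
--             nx, ny = path[-1][0] + moves[c][0], path[-1][1] + moves[c][1]
--             if -5 <= nx <= 5 and -5 <= ny <= 5:
--                 path.append((nx, ny))
--     # stage 2: canonical edge for each consecutive pair; stage 3: count distinct
--     edges = [(min(p, q), max(p, q)) for p, q in zip(path, path[1:])]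
--     return len(set(edges))
-- ===== Notes on version B (the rewrite author's own statement) =====
-- stated objective: alternative
-- what changed: B replaces A's single-pass dedup-and-count (counter plus a set holding each edge in both orientations, with list.index scans per step) by three stages: first build the list of visited points, then derive one canonical (min,max) edge per consecutive pair, then count the distinct edges with one set() build at the end.
import Mathlib
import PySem

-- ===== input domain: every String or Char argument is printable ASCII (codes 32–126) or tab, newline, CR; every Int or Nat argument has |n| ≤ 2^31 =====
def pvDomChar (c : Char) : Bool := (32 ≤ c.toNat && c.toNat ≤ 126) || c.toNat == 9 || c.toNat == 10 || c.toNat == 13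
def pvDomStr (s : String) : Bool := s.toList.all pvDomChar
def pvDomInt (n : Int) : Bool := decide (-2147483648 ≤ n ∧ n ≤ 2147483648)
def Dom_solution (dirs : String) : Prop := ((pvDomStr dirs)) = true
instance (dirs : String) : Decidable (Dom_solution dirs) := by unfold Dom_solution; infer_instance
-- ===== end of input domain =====

-- B recomputes A's answer in three stages — build the visited-point path, map consecutive pairs to canonical (min,max) edges, count distinct at the end — instead of A's single-pass counter + both-orientations edge set (alternative decomposition, same cost).


-- ===== PORT A =====
-- state: (answer, pos, px, py)
def stepA (st : Int × PySem.Set ((Int × Int) × (Int × Int)) × Int × Int) (i : Char) :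
    Int × PySem.Set ((Int × Int) × (Int × Int)) × Int × Int :=
  let (answer, pos, px, py) := st
  let dx : List Int := [1, 0, -1, 0]
  let dy : List Int := [0, 1, 0, -1]
  let di : List Char := ['R', 'U', 'L', 'D']
  if di.contains i then
    -- di.index(i): the guard guarantees membership, so index? is some; getD 0 is the value
    let idx : Int := ((PySem.List.index? di i).getD 0 : Nat)
    let nx := px + PySem.List.pyGetD dx idx 0
    let ny := py + PySem.List.pyGetD dy idx 0
    if -5 ≤ nx ∧ nx ≤ 5 ∧ -5 ≤ ny ∧ ny ≤ 5 then
      if ¬ (((px, py), (nx, ny)) ∈ pos) then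
        (answer + 1,
         PySem.Set.add (PySem.Set.add pos ((px, py), (nx, ny))) ((nx, ny), (px, py)), nx, ny)
      else (answer, pos, nx, ny)
    else (answer, pos, px, py)
  else (answer, pos, px, py)

def solution (dirs : String) : Int :=
  (dirs.toList.foldl stepA (0, PySem.Set.empty, 0, 0)).1

-- ===== PORT B =====
-- Python tuple comparison (a, b) <= (c, d), lexicographic
def pairLe (p q : Int × Int) : Bool := p.1 < q.1 || (p.1 == q.1 && p.2 ≤ q.2)

-- min(p, q) / max(p, q) on pairs, Python's first-extremal rule
def pairMin (p q : Int × Int) : Int × Int := if pairLe p q then p else q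
def pairMax (p q : Int × Int) : Int × Int := if pairLe q p then p else q

-- stage 1 body: extend the path by one point when the move is a direction inside the box
def stepB (path : List (Int × Int)) (c : Char) : List (Int × Int) :=
  let moves : PySem.Dict Char (Int × Int) :=
    PySem.Dict.ofList [('R', (1, 0)), ('U', (0, 1)), ('L', (-1, 0)), ('D', (0, -1))]
  match PySem.Dict.get? moves c with
  | none => path
  | some (dx, dy) =>
    -- path[-1]: path starts at [(0,0)] and only grows, so the index is always valid
    let last := (PySem.List.pyGet? path (-1)).getD (0, 0)
    let nx := last.1 + dx
    let ny := last.2 + dy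
    if -5 ≤ nx ∧ nx ≤ 5 ∧ -5 ≤ ny ∧ ny ≤ 5 then path ++ [(nx, ny)] else path

def solution_alt (dirs : String) : Int :=
  let path := dirs.toList.foldl stepB [(0, 0)]
  let edges := (path.zip (path.drop 1)).map (fun pq => (pairMin pq.1 pq.2, pairMax pq.1 pq.2))
  ((PySem.Set.ofList edges).length : Int)

-- ===== PRECONDITION & SPEC =====
def Spec_solution (dirs : String) (out : Int) : Prop := out = solution_alt dirs
instance (dirs : String) (out : Int) : Decidable (Spec_solution dirs out) := by unfold Spec_solution; infer_instance

-- ===== CLAIM (what is proved, stated in full; the proofs are below) =====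
def Claim_equal_solution : Prop := ∀ (dirs : String), Dom_solution dirs → Spec_solution dirs (solution dirs)

-- ===== LEMMAS AND PROOFS =====

-- the canonical edge B produces for a consecutive pair
def canonB (p q : Int × Int) : (Int × Int) × (Int × Int) := (pairMin p q, pairMax p q)

-- B's stage-2 edge list of a path
def edgesOf (path : List (Int × Int)) : List ((Int × Int) × (Int × Int)) :=
  (path.zip (path.drop 1)).map (fun pq => (pairMin pq.1 pq.2, pairMax pq.1 pq.2))

theorem canonB_comm (a b : Int × Int) : canonB a b = canonB b a := by
  rcases a with ⟨a1, a2⟩; rcases b with ⟨b1, b2⟩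
  simp only [canonB, pairMin, pairMax, pairLe]
  split_ifs <;> simp_all [Prod.ext_iff] <;> omega

theorem canonB_eq_or (a b : Int × Int) : canonB a b = (a, b) ∨ canonB a b = (b, a) := by
  rcases a with ⟨a1, a2⟩; rcases b with ⟨b1, b2⟩
  simp only [canonB, pairMin, pairMax, pairLe]
  split_ifs with h1 h2 h3 <;> simp_all [Prod.ext_iff] <;> omega

theorem canonB_inj (a b c d : Int × Int) (h : canonB a b = canonB c d) :
    (a = c ∧ b = d) ∨ (a = d ∧ b = c) := by
  rcases canonB_eq_or a b with h1 | h1 <;> rcases canonB_eq_or c d with h2 | h2 <;>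
    rw [h1, h2] at h <;> simp only [Prod.mk.injEq] at h <;> tauto

-- appending a point adds exactly one edge, from the old last point
theorem edgesOf_append (l : List (Int × Int)) (p q : Int × Int) :
    edgesOf (l ++ [p] ++ [q]) = edgesOf (l ++ [p]) ++ [canonB p q] := by
  induction l with
  | nil => rfl
  | cons x t ih =>
    cases t with
    | nil => rfl
    | cons y u =>
      simp only [edgesOf, canonB, List.cons_append, List.zip_cons_cons, List.drop_succ_cons,
        List.drop_zero, List.map_cons] at ih ⊢
      rw [ih]

-- the invariant: A's state after a prefix vs B's path after the same prefix
def EInv (sa : Int × PySem.Set ((Int × Int) × (Int × Int)) × Int × Int)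
    (path : List (Int × Int)) : Prop :=
  (∃ l, path = l ++ [(sa.2.2.1, sa.2.2.2)]) ∧
  sa.1 = ((PySem.Set.ofList (edgesOf path)).length : Int) ∧
  (∀ a b : Int × Int, ((a, b) ∈ sa.2.1) ↔ canonB a b ∈ edgesOf path)

-- the shared inner body (bounds check + append/record) preserves the invariant
theorem inv_inner (answer : Int) (pos : PySem.Set ((Int × Int) × (Int × Int)))
    (l : List (Int × Int)) (x y nx ny : Int)
    (hlen : answer = ((PySem.Set.ofList (edgesOf (l ++ [(x, y)]))).length : Int))
    (hmem : ∀ a b : Int × Int, ((a, b) ∈ pos) ↔ canonB a b ∈ edgesOf (l ++ [(x, y)])) :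
    EInv (if -5 ≤ nx ∧ nx ≤ 5 ∧ -5 ≤ ny ∧ ny ≤ 5 then
          (if ¬ (((x, y), (nx, ny)) ∈ pos) then
            (answer + 1,
             PySem.Set.add (PySem.Set.add pos ((x, y), (nx, ny))) ((nx, ny), (x, y)), nx, ny)
          else (answer, pos, nx, ny))
        else (answer, pos, x, y))
        (if -5 ≤ nx ∧ nx ≤ 5 ∧ -5 ≤ ny ∧ ny ≤ 5 then (l ++ [(x, y)]) ++ [(nx, ny)]
         else l ++ [(x, y)]) := by
  have hedge : edgesOf ((l ++ [(x, y)]) ++ [(nx, ny)])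
      = edgesOf (l ++ [(x, y)]) ++ [canonB (x, y) (nx, ny)] := edgesOf_append l (x, y) (nx, ny)
  have hof : PySem.Set.ofList (edgesOf (l ++ [(x, y)]) ++ [canonB (x, y) (nx, ny)])
      = PySem.Set.add (PySem.Set.ofList (edgesOf (l ++ [(x, y)]))) (canonB (x, y) (nx, ny)) :=
    PySem.Set.ofList_append_singleton _ _
  split_ifs with hb hin
  · -- edge already present (the ¬∈ guard is false): A leaves answer/pos alone,
    -- B's appended edge is absorbed by the final dedup
    have hcan : canonB (x, y) (nx, ny) ∈ PySem.Set.ofList (edgesOf (l ++ [(x, y)])) := by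
      rw [PySem.Set.mem_ofList]; exact (hmem _ _).1 hin
    refine ⟨⟨l ++ [(x, y)], rfl⟩, ?_, ?_⟩
    · show answer = _
      rw [hedge, hof, PySem.Set.add_of_mem hcan]; exact hlen
    · intro a b
      show (a, b) ∈ pos ↔ _
      rw [hedge]
      simp only [List.mem_append, List.mem_singleton]
      constructor
      · intro h; exact Or.inl ((hmem a b).1 h)
      · rintro (h | h)
        · exact (hmem a b).2 h
        · rcases canonB_inj _ _ _ _ h with ⟨h1, h2⟩ | ⟨h1, h2⟩
          · rw [h1, h2]; exact hin
          · rw [h1, h2]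
            exact (hmem _ _).2 (canonB_comm (nx, ny) (x, y) ▸ (hmem _ _).1 hin)
  · -- new edge: A counts it and stores both orientations, B's edge list gains a new element
    have hcan : canonB (x, y) (nx, ny) ∉ edgesOf (l ++ [(x, y)]) := fun hc => hin ((hmem _ _).2 hc)
    have hcan' : canonB (x, y) (nx, ny) ∉ PySem.Set.ofList (edgesOf (l ++ [(x, y)])) := by
      rw [PySem.Set.mem_ofList]; exact hcan
    refine ⟨⟨l ++ [(x, y)], rfl⟩, ?_, ?_⟩
    · show answer + 1 = _
      rw [hedge, hof, PySem.Set.add_of_not_mem hcan', List.length_append]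
      push_cast [hlen, List.length_singleton]; ring
    · intro a b
      show (a, b) ∈ PySem.Set.add (PySem.Set.add pos ((x, y), (nx, ny))) ((nx, ny), (x, y)) ↔ _
      rw [hedge]
      simp only [List.mem_append, List.mem_singleton, PySem.Set.mem_add, hmem]
      constructor
      · rintro ((h | h) | h)
        · exact Or.inl h
        · exact Or.inr (by rw [Prod.mk.injEq] at h; rw [h.1, h.2])
        · exact Or.inr (by rw [Prod.mk.injEq] at h; rw [h.1, h.2, canonB_comm])
      · rintro (h | h)
        · exact Or.inl (Or.inl h)
        · rcases canonB_inj _ _ _ _ h with ⟨h1, h2⟩ | ⟨h1, h2⟩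
          · exact Or.inl (Or.inr (by rw [h1, h2]))
          · exact Or.inr (by rw [h1, h2])
  · exact ⟨⟨l, rfl⟩, hlen, hmem⟩

theorem inv_step (answer : Int) (pos : PySem.Set ((Int × Int) × (Int × Int)))
    (x y : Int) (c : Char) (path : List (Int × Int))
    (h : EInv (answer, pos, x, y) path) :
    EInv (stepA (answer, pos, x, y) c) (stepB path c) := by
  obtain ⟨⟨l, hl⟩, hlen, hmem⟩ := h
  simp only at hl hlen hmem
  subst hl
  have hlast : (PySem.List.pyGet? (l ++ [(x, y)]) (-1)).getD ((0 : Int), (0 : Int)) = (x, y) := by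
    rw [PySem.List.pyGet?_neg_one_append_singleton]; rfl
  by_cases hR : c = 'R'
  · subst hR
    show EInv _ (stepB _ 'R')
    simp only [stepB, PySem.Dict.get?, hlast]
    exact inv_inner answer pos l x y (x + 1) (y + 0) hlen hmem
  by_cases hU : c = 'U'
  · subst hU
    simp only [stepB, PySem.Dict.get?, hlast]
    exact inv_inner answer pos l x y (x + 0) (y + 1) hlen hmem
  by_cases hL : c = 'L'
  · subst hL
    simp only [stepB, PySem.Dict.get?, hlast]
    exact inv_inner answer pos l x y (x + -1) (y + 0) hlen hmem
  by_cases hD : c = 'D'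
  · subst hD
    simp only [stepB, PySem.Dict.get?, hlast]
    exact inv_inner answer pos l x y (x + 0) (y + -1) hlen hmem
  -- c is not a direction character: both steps leave the state unchanged
  have h2 : PySem.Dict.get?
      (PySem.Dict.ofList [('R', ((1 : Int), (0 : Int))), ('U', (0, 1)), ('L', (-1, 0)), ('D', (0, -1))]) c = none := by
    rw [PySem.Dict.get?_eq_none_iff_not_mem_keys,
      show (PySem.Dict.ofList [('R', ((1 : Int), (0 : Int))), ('U', (0, 1)), ('L', (-1, 0)), ('D', (0, -1))]).keys
        = ['R', 'U', 'L', 'D'] from by decide]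
    simp [hR, hU, hL, hD]
  have h1 : (['R', 'U', 'L', 'D'].contains c) = false := by simp [hR, hU, hL, hD]
  simp only [stepA, stepB, h1, h2, Bool.false_eq_true, if_false]
  exact ⟨⟨l, rfl⟩, hlen, hmem⟩

theorem inv_foldl (cs : List Char)
    (sa : Int × PySem.Set ((Int × Int) × (Int × Int)) × Int × Int)
    (path : List (Int × Int)) (h : EInv sa path) :
    EInv (cs.foldl stepA sa) (cs.foldl stepB path) := by
  induction cs generalizing sa path with
  | nil => exact h
  | cons c t ih =>
    obtain ⟨answer, pos, px, py⟩ := sa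
    exact ih _ _ (inv_step answer pos px py c path h)

-- ===== VERDICT (by name: the statement is the Claim_ definition above) =====
theorem solution_spec : Claim_equal_solution := by
  intro dirs _
  unfold Spec_solution solution solution_alt
  exact (inv_foldl dirs.toList (0, PySem.Set.empty, 0, 0) [(0, 0)]
    ⟨⟨[], rfl⟩, rfl, by simp [PySem.Set.empty, edgesOf]⟩).2.1
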